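-- pv_equiv track=rewrite | github.com/69Type/SAOD-LAB2 | chess.py | is_spot_available
-- ===== SOURCE A (Python) =====
-- size = 8
--
-- def is_spot_available(x, y, pole):
--     if pole[y][x] != 0:
--         return False
--     for cur_y in range(size):
--         if pole[cur_y][x] != 0:
--             return False
--     for cur_x in range(size):
--         if pole[y][cur_x] != 0:
--             return False
--
--     if x < y:
--         a = y - x
--         for cur in range(size - a):
--             if pole[cur + a][cur] != 0:
--                 return False
--     elif x > y:
--         a = x - y
--         for cur in range(size - a):
--             if pole[cur][cur + a] != 0:
--                 return False
--     else:
--         for c in range(size):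
--             if pole[c][c] != 0:
--                 return False
--
--     return True
-- ===== SOURCE B (Python) =====
-- size = 8
--
-- def is_spot_available(x, y, pole):
--     # same initial guard as A (preserves IndexError behaviour on the queried cell)
--     if pole[y][x] != 0:
--         return False
--     # one uniform sweep over the whole board instead of three targeted loops
--     for cy in range(size):
--         for cx in range(size):
--             if pole[cy][cx] != 0 and (cx == x or cy == y or cy - cx == y - x):
--                 return False
--     return True
-- ===== Notes on version B (the rewrite author's own statement) =====
-- stated objective: simpler
-- what changed: Replaces A's three targeted scans (column loop, row loop, three-way diagonal-offset branches) with one uniform double sweep over the 8x8 board testing a single attack predicate (cx==x or cy==y or cy-cx==y-x) per cell, keeping A's initial guard.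
-- outside the precondition, e.g. on is_spot_available(-1, 1, [[9, -1], [9, 0]]): A returns False, B raises IndexError
import Mathlib
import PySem

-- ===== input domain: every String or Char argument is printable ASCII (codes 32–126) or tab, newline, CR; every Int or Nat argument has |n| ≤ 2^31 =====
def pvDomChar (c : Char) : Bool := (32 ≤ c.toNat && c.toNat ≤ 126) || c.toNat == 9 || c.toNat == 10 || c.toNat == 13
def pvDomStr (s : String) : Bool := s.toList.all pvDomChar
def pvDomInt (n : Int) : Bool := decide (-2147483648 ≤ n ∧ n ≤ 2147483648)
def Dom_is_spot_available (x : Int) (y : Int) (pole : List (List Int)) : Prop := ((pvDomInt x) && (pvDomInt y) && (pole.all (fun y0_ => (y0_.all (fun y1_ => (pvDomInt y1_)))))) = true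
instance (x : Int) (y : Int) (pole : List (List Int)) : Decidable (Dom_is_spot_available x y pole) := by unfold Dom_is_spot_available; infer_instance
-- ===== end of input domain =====

-- B replaces A's column loop, row loop and three-way diagonal branches with one uniform
-- double sweep over the board testing a single attack predicate per cell (simpler, not faster).


-- ===== PORT A =====
-- pole[i][j]; the default 0 is never reached on inputs admitted by Pre_ (all accesses in range there)
def pvCell (pole : List (List Int)) (i j : Int) : Int :=
  ((PySem.List.pyGet? pole i).bind (fun r => PySem.List.pyGet? r j)).getD 0

def is_spot_available (x : Int) (y : Int) (pole : List (List Int)) : Bool :=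
  if pvCell pole y x != 0 then false
  else if (PySem.List.pyRange 0 8 1).any (fun cy => pvCell pole cy x != 0) then false
  else if (PySem.List.pyRange 0 8 1).any (fun cx => pvCell pole y cx != 0) then false
  else if x < y then
    !((PySem.List.pyRange 0 (8 - (y - x)) 1).any (fun c => pvCell pole (c + (y - x)) c != 0))
  else if x > y then
    !((PySem.List.pyRange 0 (8 - (x - y)) 1).any (fun c => pvCell pole c (c + (x - y)) != 0))
  else
    !((PySem.List.pyRange 0 8 1).any (fun c => pvCell pole c c != 0))

-- ===== PORT B =====
def is_spot_available_alt (x : Int) (y : Int) (pole : List (List Int)) : Bool :=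
  if pvCell pole y x != 0 then false
  else (PySem.List.pyRange 0 8 1).all (fun cy =>
        (PySem.List.pyRange 0 8 1).all (fun cx =>
          !((pvCell pole cy cx != 0) && (cx == x || cy == y || cy - cx == y - x))))

-- ===== PRECONDITION & SPEC =====
-- Pre_ keeps the natural domain (a full 8×8 board, coordinates in 0..7) plus every input where the
-- queried cell pole[y][x] itself is nonzero (both programs return False at the initial guard there);
-- it excludes inputs where A raises IndexError, and inputs (out-of-range coordinates or ragged boards)
-- where A's returned value is an accident of negative-index wraparound / partial scanning that no
-- caller would specify.
def Pre_is_spot_available (x : Int) (y : Int) (pole : List (List Int)) : Prop :=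
  (pole.length = 8 ∧ (∀ r ∈ pole, r.length = 8) ∧ 0 ≤ x ∧ x < 8 ∧ 0 ≤ y ∧ y < 8)
  ∨ pvCell pole y x ≠ 0
instance (x : Int) (y : Int) (pole : List (List Int)) : Decidable (Pre_is_spot_available x y pole) := by unfold Pre_is_spot_available; infer_instance

def pvWitness_is_spot_available : Int × Int × List (List Int) :=
  (2, 5, [[0,0,0,0,0,0,0,0],[0,0,0,0,0,0,0,0],[0,0,0,0,0,0,0,0],[0,0,0,0,0,0,0,0],
          [0,0,0,0,0,0,0,0],[0,0,0,0,0,0,0,0],[0,0,0,0,0,0,0,0],[0,0,0,0,0,0,1,0]])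

def Spec_is_spot_available (x : Int) (y : Int) (pole : List (List Int)) (out : Bool) : Prop := out = is_spot_available_alt x y pole
instance (x : Int) (y : Int) (pole : List (List Int)) (out : Bool) : Decidable (Spec_is_spot_available x y pole out) := by unfold Spec_is_spot_available; infer_instance

-- ===== CLAIM (what is proved, stated in full; the proofs are below) =====
def Claim_equal_is_spot_available : Prop := ∀ (x : Int) (y : Int) (pole : List (List Int)), Dom_is_spot_available x y pole → Pre_is_spot_available x y pole → Spec_is_spot_available x y pole (is_spot_available x y pole)

-- ===== LEMMAS AND PROOFS =====

-- the common characterisation: every board cell on column x, row y or the '\\' diagonal through (x,y) is 0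
def pvSafe (x y : Int) (pole : List (List Int)) : Prop :=
  ∀ cy cx : Int, 0 ≤ cy → cy < 8 → 0 ≤ cx → cx < 8 →
    (cx = x ∨ cy = y ∨ cy - cx = y - x) → pvCell pole cy cx = 0

lemma alt_true_iff (x y : Int) (pole : List (List Int)) (hg : ¬ (pvCell pole y x != 0) = true) :
    is_spot_available_alt x y pole = true ↔ pvSafe x y pole := by
  unfold is_spot_available_alt pvSafe
  rw [if_neg hg]
  simp only [List.all_eq_true, PySem.List.mem_pyRange_one, Bool.not_eq_true',
    Bool.and_eq_false_iff, bne_eq_false_iff_eq, Bool.or_eq_false_iff, beq_eq_false_iff_ne,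
    ne_eq]
  constructor
  · intro h cy cx h1 h2 h3 h4 hattack
    rcases h cy ⟨h1, h2⟩ cx ⟨h3, h4⟩ with hc | hc
    · exact hc
    · rcases hattack with h' | h' | h' <;> simp_all
  · intro h cy hcy cx hcx
    by_cases hatt : cx = x ∨ cy = y ∨ cy - cx = y - x
    · exact Or.inl (h cy cx hcy.1 hcy.2 hcx.1 hcx.2 hatt)
    · rw [not_or, not_or] at hatt
      right
      refine ⟨⟨fun hc => hatt.1 hc, fun hc => hatt.2.1 hc⟩, fun hc => hatt.2.2 hc⟩

lemma a_true_iff (x y : Int) (pole : List (List Int)) (hx0 : 0 ≤ x) (hx8 : x < 8)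
    (hy0 : 0 ≤ y) (hy8 : y < 8) (hg : ¬ (pvCell pole y x != 0) = true) :
    is_spot_available x y pole = true ↔ pvSafe x y pole := by
  unfold is_spot_available pvSafe
  rw [if_neg hg]
  constructor
  · intro h cy cx h1 h2 h3 h4 hattack
    split_ifs at h with hcol hrow hlt hgt <;>
      try exact absurd h Bool.false_ne_true
    all_goals
      simp only [List.any_eq_true, PySem.List.mem_pyRange_one, bne_iff_ne, ne_eq, not_exists,
        not_and, not_not] at hcol hrow
    all_goals
      simp only [Bool.not_eq_true', List.any_eq_false, PySem.List.mem_pyRange_one,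
        bne_iff_ne, ne_eq, not_not] at h
    · rcases hattack with h' | h' | h'
      · subst h'; exact hcol cy ⟨h1, h2⟩
      · subst h'; exact hrow cx ⟨h3, h4⟩
      · have hcy : cy = cx + (y - x) := by omega
        rw [hcy]; exact h cx ⟨h3, by omega⟩
    · rcases hattack with h' | h' | h'
      · subst h'; exact hcol cy ⟨h1, h2⟩
      · subst h'; exact hrow cx ⟨h3, h4⟩
      · have hcx : cx = cy + (x - y) := by omega
        rw [hcx]; exact h cy ⟨h1, by omega⟩
    · rcases hattack with h' | h' | h'
      · subst h'; exact hcol cy ⟨h1, h2⟩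
      · subst h'; exact hrow cx ⟨h3, h4⟩
      · have hcx : cx = cy := by omega
        rw [hcx]; exact h cy ⟨h1, h2⟩
  · intro h
    have hcol : ¬ ((PySem.List.pyRange 0 8 1).any (fun cy => pvCell pole cy x != 0) = true) := by
      simp only [List.any_eq_true, PySem.List.mem_pyRange_one, bne_iff_ne, ne_eq, not_exists,
        not_and, not_not]
      exact fun cy hcy => h cy x hcy.1 hcy.2 hx0 hx8 (Or.inl rfl)
    have hrow : ¬ ((PySem.List.pyRange 0 8 1).any (fun cx => pvCell pole y cx != 0) = true) := by
      simp only [List.any_eq_true, PySem.List.mem_pyRange_one, bne_iff_ne, ne_eq, not_exists,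
        not_and, not_not]
      exact fun cx hcx => h y cx hy0 hy8 hcx.1 hcx.2 (Or.inr (Or.inl rfl))
    rw [if_neg hcol, if_neg hrow]
    split_ifs with hlt hgt
    · simp only [Bool.not_eq_true', List.any_eq_false, PySem.List.mem_pyRange_one,
        bne_iff_ne, ne_eq, not_not]
      exact fun c hc => h (c + (y - x)) c (by omega) (by omega) hc.1 (by omega)
        (Or.inr (Or.inr (by omega)))
    · simp only [Bool.not_eq_true', List.any_eq_false, PySem.List.mem_pyRange_one,
        bne_iff_ne, ne_eq, not_not]
      exact fun c hc => h c (c + (x - y)) hc.1 (by omega) (by omega) (by omega)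
        (Or.inr (Or.inr (by omega)))
    · simp only [Bool.not_eq_true', List.any_eq_false, PySem.List.mem_pyRange_one,
        bne_iff_ne, ne_eq, not_not]
      exact fun c hc => h c c hc.1 hc.2 hc.1 hc.2 (Or.inr (Or.inr (by omega)))

lemma key (x y : Int) (pole : List (List Int)) (hx0 : 0 ≤ x) (hx8 : x < 8)
    (hy0 : 0 ≤ y) (hy8 : y < 8) :
    is_spot_available x y pole = is_spot_available_alt x y pole := by
  by_cases hg : (pvCell pole y x != 0) = true
  · unfold is_spot_available is_spot_available_alt
    rw [if_pos hg, if_pos hg]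
  · rw [Bool.eq_iff_iff, a_true_iff x y pole hx0 hx8 hy0 hy8 hg, alt_true_iff x y pole hg]

-- ===== VERDICT (by name: the statement is the Claim_ definition above) =====
theorem is_spot_available_spec : Claim_equal_is_spot_available := by
  intro x y pole _ hpre
  unfold Spec_is_spot_available
  rcases hpre with ⟨_, _, hx0, hx8, hy0, hy8⟩ | hg
  · exact key x y pole hx0 hx8 hy0 hy8
  · have hg' : (pvCell pole y x != 0) = true := by simpa using hg
    unfold is_spot_available is_spot_available_alt
    rw [if_pos hg', if_pos hg']
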